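-- pv_equiv track=rewrite | github.com/arpan-lol/cosmic-engine | backend/src/scripts/utils.py | determine_chunk_page_number
-- ===== SOURCE A (Python) =====
-- from typing import Optional, Dict, Any, List
--
-- def determine_chunk_page_number(
--     chunk_start_pos: int, page_positions: Dict[int, int]
-- ) -> Optional[int]:
--     """
--     Determine the page number for a chunk based on its start position.
--     """
--     if not page_positions:
--         return None
--
--     # Find the page that contains this chunk
--     relevant_page = None
--     for pos, page_num in sorted(page_positions.items()):
--         if chunk_start_pos >= pos:
--             relevant_page = page_num
--         else:
--             break
--
--     return relevant_page
-- ===== SOURCE B (Python) =====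
-- from typing import Optional, Dict
--
-- def determine_chunk_page_number(
--     chunk_start_pos: int, page_positions: Dict[int, int]
-- ) -> Optional[int]:
--     """Single pass: keep the qualifying (pos, page) pairs and take the one
--     with the largest position, with no sorting."""
--     candidates = [item for item in page_positions.items() if chunk_start_pos >= item[0]]
--     if not candidates:
--         return None
--     return max(candidates)[1]
-- ===== Notes on version B (the rewrite author's own statement) =====
-- stated objective: faster
-- what changed: Replaces sort-then-scan-with-break by a single filter of qualifying (pos, page) pairs followed by max over them.
import Mathlib
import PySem

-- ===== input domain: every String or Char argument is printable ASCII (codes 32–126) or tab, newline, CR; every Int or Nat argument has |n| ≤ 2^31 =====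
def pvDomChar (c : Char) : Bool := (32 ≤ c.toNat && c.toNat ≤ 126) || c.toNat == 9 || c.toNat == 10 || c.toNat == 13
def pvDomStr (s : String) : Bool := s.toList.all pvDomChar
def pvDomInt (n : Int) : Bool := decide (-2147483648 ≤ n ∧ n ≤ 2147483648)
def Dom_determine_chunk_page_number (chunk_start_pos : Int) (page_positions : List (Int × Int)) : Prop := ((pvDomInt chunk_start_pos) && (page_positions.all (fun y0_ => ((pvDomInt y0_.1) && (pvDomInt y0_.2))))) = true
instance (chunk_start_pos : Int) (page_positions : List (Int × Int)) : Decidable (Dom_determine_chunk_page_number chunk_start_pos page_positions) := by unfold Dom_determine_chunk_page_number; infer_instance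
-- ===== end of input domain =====

-- B replaces A's sort-then-scan-with-break by one filter of the qualifying pairs followed by max over them.

-- ===== PORT A =====
-- the for-loop with break: walk the sorted items, remembering the last qualifying page
def pvLoopA (chunk_start_pos : Int) : List (Int × Int) → Option Int → Option Int
  | [], relevant_page => relevant_page
  | (pos, page_num) :: rest, relevant_page =>
      if chunk_start_pos ≥ pos then pvLoopA chunk_start_pos rest (some page_num)
      else relevant_page

def determine_chunk_page_number (chunk_start_pos : Int) (page_positions : List (Int × Int)) : Option Int :=
  if page_positions = [] then none
  else pvLoopA chunk_start_pos (PySem.List.sorted2 page_positions Prod.fst Prod.snd) none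

-- ===== PORT B =====
-- Python's tuple comparison `p > best`, as used by max(candidates)
def pvTupGt (p best : Int × Int) : Bool := decide (best.1 < p.1 ∨ (p.1 = best.1 ∧ best.2 < p.2))

def determine_chunk_page_number_alt (chunk_start_pos : Int) (page_positions : List (Int × Int)) : Option Int :=
  match page_positions.filter (fun item => decide (chunk_start_pos ≥ item.1)) with
  | [] => none
  | c :: t => some ((t.foldl (fun best p => if pvTupGt p best then p else best) c).2)

-- ===== PRECONDITION & SPEC =====
def Spec_determine_chunk_page_number (chunk_start_pos : Int) (page_positions : List (Int × Int)) (out : Option Int) : Prop := out = determine_chunk_page_number_alt chunk_start_pos page_positions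
instance (chunk_start_pos : Int) (page_positions : List (Int × Int)) (out : Option Int) : Decidable (Spec_determine_chunk_page_number chunk_start_pos page_positions out) := by unfold Spec_determine_chunk_page_number; infer_instance

-- ===== CLAIM (what is proved, stated in full; the proofs are below) =====
def Claim_equal_determine_chunk_page_number : Prop := ∀ (chunk_start_pos : Int) (page_positions : List (Int × Int)), Dom_determine_chunk_page_number chunk_start_pos page_positions → Spec_determine_chunk_page_number chunk_start_pos page_positions (determine_chunk_page_number chunk_start_pos page_positions)

-- ===== LEMMAS AND PROOFS =====

-- sorted2 with Prod.fst/Prod.snd is sorting under the lexicographic linear order on pairs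
theorem pv_sorted2_eq_sorted_lex (ps : List (Int × Int)) :
    PySem.List.sorted2 ps Prod.fst Prod.snd = PySem.List.sorted ps (fun p => toLex p) := by
  have hb : (fun (a b : Int × Int) => decide (a.1 < b.1) || (!decide (b.1 < a.1) && decide (a.2 < b.2)))
      = (fun (a b : Int × Int) => decide (toLex a < toLex b)) := by
    funext a b
    simp only [Prod.Lex.lt_iff, ofLex_toLex, Bool.decide_or, Bool.decide_and]
    by_cases h1 : a.1 < b.1 <;> by_cases h2 : b.1 < a.1 <;> by_cases h3 : a.1 = b.1 <;>
      by_cases h4 : a.2 < b.2 <;> simp_all <;> omega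
  show List.foldl _ [] ps = List.foldl _ [] ps
  simp only [Bool.false_eq_true, if_false, hb]

-- A's loop on a lex-sorted list returns the page of the last qualifying element
theorem pv_loopA_sorted (c : Int) (l : List (Int × Int))
    (h : l.Pairwise (fun a b => toLex a ≤ toLex b)) (acc : Option Int) :
    pvLoopA c l acc =
      match (l.filter (fun p => decide (c ≥ p.1))).getLast? with
      | none => acc
      | some p => some p.2 := by
  induction l generalizing acc with
  | nil => simp [pvLoopA]
  | cons hd tl ih =>
    obtain ⟨p, pg⟩ := hd
    rw [List.pairwise_cons] at h
    by_cases hc : c ≥ p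
    · rw [List.filter_cons_of_pos (by simpa using hc)]
      rw [show pvLoopA c ((p, pg) :: tl) acc = pvLoopA c tl (some pg) from by simp [pvLoopA, hc]]
      rw [ih h.2 (some pg)]
      rcases hlast : (tl.filter (fun q => decide (c ≥ q.1))).getLast? with _ | q
      · rw [List.getLast?_eq_none_iff] at hlast
        simp [hlast]
      · rw [List.getLast?_cons, hlast]
        simp
    · have hfil : tl.filter (fun q => decide (c ≥ q.1)) = [] := by
        rw [List.filter_eq_nil_iff]
        intro q hq
        have hle := h.1 q hq
        rw [Prod.Lex.le_iff] at hle
        simp only [ofLex_toLex] at hle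
        simp only [ge_iff_le, decide_eq_true_eq, not_le]
        rcases hle with h' | ⟨h1, _⟩ <;> omega
      rw [List.filter_cons_of_neg (by simpa using hc)]
      simp [pvLoopA, hc, hfil]

-- the last element of a lex-nondecreasing list is an upper bound
theorem pv_getLast_isMax (l : List (Int × Int)) (hne : l ≠ [])
    (h : l.Pairwise (fun a b => toLex a ≤ toLex b)) :
    ∀ x ∈ l, toLex x ≤ toLex (l.getLast hne) := by
  induction l with
  | nil => exact absurd rfl hne
  | cons hd tl ih =>
    rw [List.pairwise_cons] at h
    intro x hx
    cases tl with
    | nil => simp at hx; subst hx; exact le_refl _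
    | cons y ys =>
      rw [List.getLast_cons (by simp)]
      rcases List.mem_cons.mp hx with rfl | hx'
      · exact le_trans (h.1 _ (List.getLast_mem _)) (le_refl _)
      · exact ih (by simp) h.2 x hx'

-- B's running max is a member of c :: t and an upper bound of it
theorem pv_foldmax_spec (c : Int × Int) (t : List (Int × Int)) :
    (t.foldl (fun best p => if pvTupGt p best then p else best) c) ∈ c :: t ∧
    ∀ x ∈ c :: t, toLex x ≤ toLex (t.foldl (fun best p => if pvTupGt p best then p else best) c) := by
  induction t generalizing c with
  | nil => simp
  | cons p t ih =>
    have hstep : (if pvTupGt p c then p else c) = c ∨ (if pvTupGt p c then p else c) = p := by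
      by_cases h : pvTupGt p c <;> simp [h]
    have hc : toLex c ≤ toLex (if pvTupGt p c then p else c) ∧
        toLex p ≤ toLex (if pvTupGt p c then p else c) := by
      by_cases h : pvTupGt p c
      · rw [if_pos h]
        simp only [pvTupGt, decide_eq_true_eq] at h
        refine ⟨?_, le_refl _⟩
        rw [Prod.Lex.le_iff]; simp only [ofLex_toLex]; omega
      · rw [if_neg h]
        simp only [pvTupGt, decide_eq_true_eq, not_or, not_and, not_lt] at h
        refine ⟨le_refl _, ?_⟩
        rw [Prod.Lex.le_iff]; simp only [ofLex_toLex]; omega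
    obtain ⟨hmem, hub⟩ := ih (if pvTupGt p c then p else c)
    refine ⟨?_, ?_⟩
    · simp only [List.foldl_cons]
      rcases List.mem_cons.mp hmem with hm | hm
      · rcases hstep with h | h <;> rw [hm, h] <;> simp
      · exact List.mem_cons_of_mem _ (List.mem_cons_of_mem _ hm)
    · intro x hx
      simp only [List.foldl_cons]
      rcases List.mem_cons.mp hx with rfl | hx'
      · exact le_trans hc.1 (hub _ (List.mem_cons_self))
      · rcases List.mem_cons.mp hx' with rfl | hx'' 
        · exact le_trans hc.2 (hub _ (List.mem_cons_self))
        · exact hub _ (List.mem_cons_of_mem _ hx'')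

-- ===== VERDICT (by name: the statement is the Claim_ definition above) =====
theorem determine_chunk_page_number_spec : Claim_equal_determine_chunk_page_number := by
  intro c ps _
  show determine_chunk_page_number c ps = determine_chunk_page_number_alt c ps
  by_cases hnil : ps = []
  · subst hnil; rfl
  · unfold determine_chunk_page_number determine_chunk_page_number_alt
    rw [if_neg hnil, pv_sorted2_eq_sorted_lex]
    set s := PySem.List.sorted ps (fun p => toLex p) with hs
    have hpair : s.Pairwise (fun a b => toLex a ≤ toLex b) :=
      PySem.List.sorted_pairwise ps (fun p => toLex p)
    have hperm : s.Perm ps := PySem.List.sorted_perm ps (fun p => toLex p) false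
    have hpermf : (s.filter (fun q => decide (c ≥ q.1))).Perm
        (ps.filter (fun q => decide (c ≥ q.1))) := hperm.filter _
    have hpairf : (s.filter (fun q => decide (c ≥ q.1))).Pairwise (fun a b => toLex a ≤ toLex b) :=
      hpair.sublist List.filter_sublist
    rw [pv_loopA_sorted c s hpair none]
    rcases hfp : ps.filter (fun q => decide (c ≥ q.1)) with _ | ⟨c0, t⟩
    · have : s.filter (fun q => decide (c ≥ q.1)) = [] := by
        rw [hfp] at hpermf; exact hpermf.eq_nil
      rw [this, hfp]; rfl
    · have hne : s.filter (fun q => decide (c ≥ q.1)) ≠ [] := by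
        intro hn; rw [hn, hfp] at hpermf; exact absurd hpermf.nil_eq (by simp)
      set m2 := (s.filter (fun q => decide (c ≥ q.1))).getLast hne with hm2
      set m1 := t.foldl (fun best p => if pvTupGt p best then p else best) c0 with hm1
      obtain ⟨hmem1, hub1⟩ := pv_foldmax_spec c0 t
      have hm1mem : m1 ∈ s.filter (fun q => decide (c ≥ q.1)) := by
        apply hpermf.mem_iff.mpr; rw [hfp]; exact hmem1
      have hm2mem : m2 ∈ ps.filter (fun q => decide (c ≥ q.1)) :=
        hpermf.mem_iff.mp (List.getLast_mem hne)
      have h12 : toLex m1 ≤ toLex m2 := pv_getLast_isMax _ hne hpairf m1 hm1mem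
      have h21 : toLex m2 ≤ toLex m1 := hub1 m2 (by rw [← hfp]; exact hm2mem)
      have : m1 = m2 := toLex.injective (le_antisymm h12 h21)
      rw [hfp, List.getLast?_eq_getLast_of_ne_nil hne]
      exact congrArg (fun p : Int × Int => some p.2) this.symm
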